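-- pv_equiv track=rewrite | github.com/SamuelNw/Python-Challenges | codewars/make_password.py | make_password
-- ===== SOURCE A (Python) =====
-- def make_password(phrase):
--     # Your code here
--     phrase_list = phrase.split()
--     firsts = []
--     for word in phrase_list:
--         firsts.append(word[0])
--     s = "".join(firsts)
--     q = s.replace("i", "1")
--     r = q.replace("I", "1")
--     t = r.replace("o", "0")
--     u = t.replace("O", "0")
--     v = u.replace("s", "5")
--     w = v.replace("S", "5")
--     return w
-- ===== SOURCE B (Python) =====
-- def make_password(phrase):
--     subs = {"i": "1", "I": "1", "o": "0", "O": "0", "s": "5", "S": "5"}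
--     out = []
--     for word in phrase.split():
--         ch = word[0]
--         out.append(subs.get(ch, ch))
--     return "".join(out)
-- ===== Notes on version B (the rewrite author's own statement) =====
-- stated objective: simpler
-- what changed: One pass builds the already-substituted initials via a substitution dict, instead of gathering initials and then scanning the joined string six times with sequential str.replace calls.
import Mathlib
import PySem

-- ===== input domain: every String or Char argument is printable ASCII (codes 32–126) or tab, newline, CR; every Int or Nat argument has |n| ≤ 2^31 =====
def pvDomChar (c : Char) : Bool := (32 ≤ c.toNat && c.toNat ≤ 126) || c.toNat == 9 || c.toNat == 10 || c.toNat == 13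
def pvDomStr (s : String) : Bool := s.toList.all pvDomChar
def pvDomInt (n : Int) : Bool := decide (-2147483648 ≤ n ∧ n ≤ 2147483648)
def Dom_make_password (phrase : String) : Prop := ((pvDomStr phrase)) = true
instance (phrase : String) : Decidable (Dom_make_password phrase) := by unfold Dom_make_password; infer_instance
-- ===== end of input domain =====

-- B replaces A's gather-then-six-replace-scans with one pass that emits already-substituted initials via a dict.

-- ===== PORT A =====
def make_password (phrase : String) : String :=
  let phrase_list := PySem.Str.split₀ phrase
  -- word[0]: split() never yields an empty word, so the .getD branch is unreachable
  let firsts : List String :=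
    phrase_list.foldl (fun acc word => acc ++ [String.ofList [(PySem.Str.pyGet? word 0).getD ' ']]) []
  let s := PySem.Str.join "" firsts
  let q := PySem.Str.replace s "i" "1"
  let r := PySem.Str.replace q "I" "1"
  let t := PySem.Str.replace r "o" "0"
  let u := PySem.Str.replace t "O" "0"
  let v := PySem.Str.replace u "s" "5"
  let w := PySem.Str.replace v "S" "5"
  w

-- ===== PORT B =====
def make_password_alt (phrase : String) : String :=
  let subs : PySem.Dict Char Char :=
    PySem.Dict.ofList [('i', '1'), ('I', '1'), ('o', '0'), ('O', '0'), ('s', '5'), ('S', '5')]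
  let out : List String :=
    (PySem.Str.split₀ phrase).foldl (fun acc word =>
      -- word[0]: split() never yields an empty word, so the .getD branch is unreachable
      let ch := (PySem.Str.pyGet? word 0).getD ' '
      acc ++ [String.ofList [subs.getD ch ch]]) []
  PySem.Str.join "" out

-- ===== PRECONDITION & SPEC =====
def Spec_make_password (phrase : String) (out : String) : Prop := out = make_password_alt phrase
instance (phrase : String) (out : String) : Decidable (Spec_make_password phrase out) := by unfold Spec_make_password; infer_instance

-- ===== CLAIM (what is proved, stated in full; the proofs are below) =====
def Claim_equal_make_password : Prop := ∀ (phrase : String), Dom_make_password phrase → Spec_make_password phrase (make_password phrase)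

-- ===== LEMMAS AND PROOFS =====

/-- A fold appending one element per item is a map. -/
theorem pv_foldl_append_map {α β : Type} (f : α → β) :
    ∀ (l : List α) (a0 : List β), l.foldl (fun acc x => acc ++ [f x]) a0 = a0 ++ l.map f := by
  intro l
  induction l with
  | nil => simp
  | cons x t ih => intro a0; simp [List.foldl, ih]

/-- replace.go with a single-char pattern is a pointwise map. -/
theorem pv_replace_go_single (a b : Char) :
    ∀ (l : List Char) (fuel : Nat) (acc : List Char), l.length ≤ fuel →
      PySem.Chars.replace.go [a] [b] fuel l acc
        = acc.reverse ++ l.map (fun c => if c == a then b else c) := by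
  intro l
  induction l with
  | nil =>
    intro fuel acc _
    cases fuel <;> simp [PySem.Chars.replace.go]
  | cons c t ih =>
    intro fuel acc hf
    cases fuel with
    | zero => simp at hf
    | succ n =>
      unfold PySem.Chars.replace.go
      by_cases h : a = c
      · subst h
        simp [List.isPrefixOf, ih n (b :: acc) (by simpa using hf)]
      · simp [List.isPrefixOf, h, ih n (c :: acc) (by simpa using hf)]
        exact fun hca => absurd hca.symm h

theorem pv_replace_single (cs : List Char) (a b : Char) :
    PySem.Chars.replace cs [a] [b] = cs.map (fun c => if c == a then b else c) := by
  unfold PySem.Chars.replace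
  simp [pv_replace_go_single a b cs cs.length [] (le_refl _)]

/-- the six substitutions, fused, agree with the dict lookup -/
theorem pv_subs_pointwise (c : Char) :
    (let s1 := if c == 'i' then '1' else c
     let s2 := if s1 == 'I' then '1' else s1
     let s3 := if s2 == 'o' then '0' else s2
     let s4 := if s3 == 'O' then '0' else s3
     let s5 := if s4 == 's' then '5' else s4
     if s5 == 'S' then '5' else s5)
      = (PySem.Dict.ofList [('i', '1'), ('I', '1'), ('o', '0'), ('O', '0'), ('s', '5'), ('S', '5')] : PySem.Dict Char Char).getD c c := by
  by_cases h1 : c = 'i'; · subst h1; decide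
  by_cases h2 : c = 'I'; · subst h2; decide
  by_cases h3 : c = 'o'; · subst h3; decide
  by_cases h4 : c = 'O'; · subst h4; decide
  by_cases h5 : c = 's'; · subst h5; decide
  by_cases h6 : c = 'S'; · subst h6; decide
  have hitems : (PySem.Dict.ofList [('i', '1'), ('I', '1'), ('o', '0'), ('O', '0'), ('s', '5'), ('S', '5')] : PySem.Dict Char Char).items
      = [('i', '1'), ('I', '1'), ('o', '0'), ('O', '0'), ('s', '5'), ('S', '5')] := by decide
  have e1 : ('i' == c) = false := by simpa using fun he => h1 he.symm
  have e2 : ('I' == c) = false := by simpa using fun he => h2 he.symm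
  have e3 : ('o' == c) = false := by simpa using fun he => h3 he.symm
  have e4 : ('O' == c) = false := by simpa using fun he => h4 he.symm
  have e5 : ('s' == c) = false := by simpa using fun he => h5 he.symm
  have e6 : ('S' == c) = false := by simpa using fun he => h6 he.symm
  simp [PySem.Dict.getD, PySem.Dict.get?, hitems, List.find?, e1, e2, e3, e4, e5, e6, h1, h2, h3, h4, h5, h6]

theorem pv_join_map {α : Type} (f : α → Char) (l : List α) :
    PySem.Chars.join [] (l.map (fun w => [f w])) = l.map f := by
  have h := PySem.Chars.join_nil_singletons (l.map f)
  simpa [List.map_map, Function.comp] using h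

-- ===== VERDICT (by name: the statement is the Claim_ definition above) =====
theorem make_password_spec : Claim_equal_make_password := by
  intro phrase _
  unfold Spec_make_password make_password make_password_alt
  apply String.toList_inj.mp
  dsimp only
  rw [pv_foldl_append_map, pv_foldl_append_map]
  simp only [List.nil_append, PySem.Str.toList_replace, PySem.Str.toList_join, List.map_map]
  rw [show ("" : String).toList = [] from rfl, show ("i" : String).toList = ['i'] from rfl,
      show ("I" : String).toList = ['I'] from rfl, show ("o" : String).toList = ['o'] from rfl,
      show ("O" : String).toList = ['O'] from rfl, show ("s" : String).toList = ['s'] from rfl,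
      show ("S" : String).toList = ['S'] from rfl, show ("1" : String).toList = ['1'] from rfl,
      show ("0" : String).toList = ['0'] from rfl, show ("5" : String).toList = ['5'] from rfl]
  simp only [Function.comp_def, String.toList_ofList]
  rw [pv_join_map, pv_join_map, pv_replace_single, pv_replace_single, pv_replace_single,
      pv_replace_single, pv_replace_single, pv_replace_single]
  simp only [List.map_map, Function.comp_def]
  apply List.map_congr_left
  intro w _
  exact pv_subs_pointwise _
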